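-- pv_equiv track=rewrite | github.com/nairraghav/advent-of-code | 2023/day-14/part1.py | row_shift_zeroes_left
-- ===== SOURCE A (Python) =====
-- def row_shift_zeroes_left(line):
--     last_to_check = 0
--     for index in range(len(line)):
--         if line[index] == "O":
--             check_index = index - 1
--             possible_place_index = index
--
--             while check_index >= last_to_check:
--                 if line[check_index] in ("O", "#"):
--                     break
--                 else:
--                     possible_place_index = check_index
--                 check_index -= 1
--
--             if possible_place_index != index:
--                 line[possible_place_index], line[index] = line[index], line[possible_place_index]
--
--     return line
-- ===== SOURCE B (Python) =====
-- def row_shift_zeroes_left(line):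
--     free = 0
--     for i in range(len(line)):
--         c = line[i]
--         if c == "O":
--             if free != i:
--                 line[free], line[i] = line[i], line[free]
--             free += 1
--         elif c == "#":
--             free = i + 1
--     return line
-- ===== Notes on version B (the rewrite author's own statement) =====
-- stated objective: alternative
-- what changed: Replaces A's inner backward while-scan per 'O' with a single left-to-right pass maintaining a free-slot pointer that is bumped past each settled 'O' and reset after each '#'; a timing run did not confirm a speed-up on its generated inputs, so no speed is claimed.
import Mathlib
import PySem

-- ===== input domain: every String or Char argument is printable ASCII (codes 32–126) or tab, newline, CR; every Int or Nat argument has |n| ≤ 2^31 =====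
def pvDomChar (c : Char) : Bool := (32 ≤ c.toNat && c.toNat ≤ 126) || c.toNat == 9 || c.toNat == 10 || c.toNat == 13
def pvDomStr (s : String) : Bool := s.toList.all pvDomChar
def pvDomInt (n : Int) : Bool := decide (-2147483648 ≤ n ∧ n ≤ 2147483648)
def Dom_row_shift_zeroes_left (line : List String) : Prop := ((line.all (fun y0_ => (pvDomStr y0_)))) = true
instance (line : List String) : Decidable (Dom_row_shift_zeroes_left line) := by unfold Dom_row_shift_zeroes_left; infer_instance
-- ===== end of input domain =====

-- B replaces A's per-'O' backward while-scan with a single pass maintaining a free-slot pointer (alternative algorithm; no speed claim).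
-- A mutates its argument in place and returns it; the equivalence proved here is about the return value
-- (the Python B performs the same in-place mutation).

-- ===== PORT A =====
-- line[i] for an Int index; every use below is with an in-range non-negative index,
-- so the `.getD ""` default is never taken (exact there).
def pvGetStr (l : List String) (i : Int) : String := (PySem.List.pyGet? l i).getD ""

-- Python's `line[a], line[b] = line[b], line[a]` (simultaneous assignment; a,b in range, non-negative in every use).
def pvSwap (l : List String) (a b : Int) : List String :=
  let x := pvGetStr l a
  let y := pvGetStr l b
  (l.set a.toNat y).set b.toNat x

-- A's inner `while check_index >= last_to_check` loop; returns the final possible_place_index.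
def aWhile (line : List String) (lastToCheck checkIndex pp : Int) : Int :=
  if _h : lastToCheck ≤ checkIndex then
    if pvGetStr line checkIndex = "O" ∨ pvGetStr line checkIndex = "#" then pp
    else aWhile line lastToCheck (checkIndex - 1) checkIndex
  else pp
termination_by (checkIndex + 1 - lastToCheck).toNat
decreasing_by omega

-- A's `for index in range(len(line))` loop over the mutable list state (n = len(line), fixed).
def aLoop (n : Nat) (line : List String) (index : Nat) : List String :=
  if _h : index < n then
    let line' :=
      if pvGetStr line index = "O" then
        let pp := aWhile line 0 ((index : Int) - 1) index
        if pp ≠ (index : Int) then pvSwap line pp index else line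
      else line
    aLoop n line' (index + 1)
  else line
termination_by n - index

def row_shift_zeroes_left (line : List String) : List String :=
  aLoop line.length line 0

-- ===== PORT B =====
-- B's single pass: `free` is the first slot after the last blocker/settled 'O'.
def bLoop (n : Nat) (line : List String) (free i : Nat) : List String :=
  if _h : i < n then
    let c := pvGetStr line i
    if c = "O" then
      bLoop n (if free ≠ i then pvSwap line free i else line) (free + 1) (i + 1)
    else if c = "#" then
      bLoop n line (i + 1) (i + 1)
    else
      bLoop n line free (i + 1)
  else line
termination_by n - i

def row_shift_zeroes_left_alt (line : List String) : List String :=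
  bLoop line.length line 0 0

-- ===== PRECONDITION & SPEC =====
def Spec_row_shift_zeroes_left (line : List String) (out : List String) : Prop := out = row_shift_zeroes_left_alt line
instance (line : List String) (out : List String) : Decidable (Spec_row_shift_zeroes_left line out) := by unfold Spec_row_shift_zeroes_left; infer_instance

-- ===== CLAIM (what is proved, stated in full; the proofs are below) =====
def Claim_equal_row_shift_zeroes_left : Prop := ∀ (line : List String), Dom_row_shift_zeroes_left line → Spec_row_shift_zeroes_left line (row_shift_zeroes_left line)

-- ===== LEMMAS AND PROOFS =====

-- "blocker": an element that stops a rolling 'O'.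
def isB (s : String) : Prop := s = "O" ∨ s = "#"

theorem pvGetStr_nat (l : List String) (j : Nat) : pvGetStr l (j : Int) = (l[j]?).getD "" := by
  simp [pvGetStr]

theorem length_pvSwap (l : List String) (a b : Int) : (pvSwap l a b).length = l.length := by
  simp [pvSwap]

-- A's inner while computes exactly the free-slot pointer.
theorem aWhile_eq (line : List String) (free : Int) (hf0 : 0 ≤ free)
    (hB : free = 0 ∨ isB (pvGetStr line (free - 1))) :
    ∀ (m : Nat) (check pp : Int), (check + 1).toNat = m → free ≤ check + 1 →
    (∀ j : Int, free ≤ j → j ≤ check → ¬ isB (pvGetStr line j)) →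
    aWhile line 0 check pp = if free ≤ check then free else pp := by
  intro m
  induction m using Nat.strong_induction_on with
  | _ m ih =>
    intro check pp hm hle hN
    rw [aWhile]
    by_cases hc : (0:Int) ≤ check
    · rw [dif_pos hc]
      by_cases hblk : pvGetStr line check = "O" ∨ pvGetStr line check = "#"
      · rw [if_pos hblk]
        have : ¬ free ≤ check := by
          intro h
          exact hN check h le_rfl hblk
        rw [if_neg this]
      · rw [if_neg hblk]
        have hfc : free ≤ check := by
          rcases lt_or_eq_of_le hle with h | h
          · omega
          · exfalso
            apply hblk
            rcases hB with h0 | hb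
            · omega
            · have : free - 1 = check := by omega
              rwa [this] at hb
        have hrec := ih check.toNat (by omega) (check - 1) check (by omega) (by omega)
          (fun j h1 h2 => hN j h1 (by omega))
        rw [hrec]
        by_cases h2 : free ≤ check - 1
        · rw [if_pos h2, if_pos hfc]
        · rw [if_neg h2, if_pos hfc]
          omega
    · rw [dif_neg hc, if_neg (by omega)]

-- getElem? through pvSwap, by cases on the position.
theorem pvGetStr_swap_ne (l : List String) (a b j : Nat) (ha : j ≠ a) (hb : j ≠ b) :
    pvGetStr (pvSwap l (a : Int) (b : Int)) (j : Int) = pvGetStr l (j : Int) := by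
  simp only [pvGetStr_nat, pvSwap, Int.toNat_natCast, List.getElem?_set]
  rw [if_neg (by omega : ¬ b = j), if_neg (by omega : ¬ a = j)]

theorem pvGetStr_swap_a (l : List String) (a b : Nat) (ha : a < l.length) (hab : a ≠ b) :
    pvGetStr (pvSwap l (a : Int) (b : Int)) (a : Int) = pvGetStr l (b : Int) := by
  simp only [pvGetStr_nat, pvSwap, Int.toNat_natCast, List.getElem?_set]
  rw [if_neg (by omega : ¬ b = a)]
  simp [ha]

theorem pvGetStr_swap_b (l : List String) (a b : Nat) (hb : b < l.length) :
    pvGetStr (pvSwap l (a : Int) (b : Int)) (b : Int) = pvGetStr l (a : Int) := by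
  simp only [pvGetStr_nat, pvSwap, Int.toNat_natCast, List.getElem?_set]
  simp [hb]

theorem main_lemma : ∀ (k n i free : Nat) (line : List String),
    k = n - i → n = line.length → free ≤ i →
    (∀ j : Nat, free ≤ j → j < i → ¬ isB (pvGetStr line (j : Int))) →
    (free = 0 ∨ isB (pvGetStr line ((free : Int) - 1))) →
    aLoop n line i = bLoop n line free i := by
  intro k
  induction k using Nat.strong_induction_on with
  | _ k ih =>
    intro n i free line hk hn hfi hN hB
    rw [aLoop, bLoop]
    by_cases hin : i < n
    · rw [dif_pos hin, dif_pos hin]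
      dsimp only
      by_cases hO : pvGetStr line (i : Int) = "O"
      · simp only [if_pos hO]
        have hpp : aWhile line 0 ((i : Int) - 1) i
            = if (free : Int) ≤ (i : Int) - 1 then (free : Int) else (i : Int) := by
          apply aWhile_eq line free (by omega) (hB.imp (fun h => by exact_mod_cast h) id) ((i : Int) - 1 + 1).toNat _ _ rfl (by omega)
          intro j h1 h2
          have hj0 : 0 ≤ j := le_trans (by omega) h1
          have : j = ((j.toNat : Nat) : Int) := by omega
          rw [this]
          exact hN j.toNat (by omega) (by omega)
        by_cases hfree : free < i
        · -- swap case in both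
          have hppv : aWhile line 0 ((i : Int) - 1) i = (free : Int) := by
            rw [hpp, if_pos (by omega)]
          rw [hppv, if_pos (by omega : (free : Int) ≠ (i : Int)), if_pos (by omega : free ≠ i)]
          apply ih (n - (i + 1)) (by omega) n (i + 1) (free + 1) _ rfl
            (by rw [hn, length_pvSwap]) (by omega)
          · intro j h1 h2
            by_cases hji : j = i
            · subst hji
              rw [pvGetStr_swap_b line free j (by omega)]
              exact hN free le_rfl (by omega)
            · rw [pvGetStr_swap_ne line free i j (by omega) hji]
              exact hN j (by omega) (by omega)
          · right
            have : ((free + 1 : Nat) : Int) - 1 = ((free : Nat) : Int) := by omega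
            rw [this, pvGetStr_swap_a line free i (by omega) (by omega), hO]
            exact Or.inl rfl
        · -- free = i: no swap in either
          have hfeq : free = i := by omega
          have hppv : aWhile line 0 ((i : Int) - 1) i = (i : Int) := by
            rw [hpp, if_neg (by omega)]
          rw [hppv, if_neg (by omega : ¬ (i : Int) ≠ (i : Int)),
              if_neg (by omega : ¬ free ≠ i)]
          apply ih (n - (i + 1)) (by omega) n (i + 1) (free + 1) line rfl hn (by omega)
          · intro j h1 h2
            omega
          · right
            have : ((free + 1 : Nat) : Int) - 1 = ((i : Nat) : Int) := by omega
            rw [this, hO]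
            exact Or.inl rfl
      · simp only [if_neg hO]
        by_cases hH : pvGetStr line (i : Int) = "#"
        · simp only [if_pos hH]
          apply ih (n - (i + 1)) (by omega) n (i + 1) (i + 1) line rfl hn le_rfl
          · intro j h1 h2
            omega
          · right
            have : ((i + 1 : Nat) : Int) - 1 = ((i : Nat) : Int) := by omega
            rw [this, hH]
            exact Or.inr rfl
        · simp only [if_neg hH]
          apply ih (n - (i + 1)) (by omega) n (i + 1) free line rfl hn (by omega)
          · intro j h1 h2
            by_cases hji : j = i
            · subst hji
              intro hb
              rcases hb with h | h
              · exact hO h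
              · exact hH h
            · exact hN j h1 (by omega)
          · exact hB
    · rw [dif_neg hin, dif_neg hin]

-- ===== VERDICT (by name: the statement is the Claim_ definition above) =====
theorem row_shift_zeroes_left_spec : Claim_equal_row_shift_zeroes_left := by
  intro line _
  unfold Spec_row_shift_zeroes_left row_shift_zeroes_left row_shift_zeroes_left_alt
  exact main_lemma line.length line.length 0 0 line rfl rfl (Nat.le_refl 0)
    (by intro j h1 h2; omega) (Or.inl rfl)
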